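-- pv_equiv track=rewrite | github.com/DGBIZT/practice | src/description_category.py | count_operations_by_category
-- ===== SOURCE A (Python) =====
-- from collections import Counter
--
-- def count_operations_by_category(operations: list[dict[str, str]], categories: list) -> dict:
--
--     """Функция принимает список словарей с данными о банковских операциях и список категорий операций,
--     а возвращает словарь, в котором ключи — это названия категорий,
--     а значения — это количество операций в каждой категории."""
--
--     # all_categories = [operation.get("description") for operation in operations]
--
--     all_categories = list()
--
--     for operation in operations:
--         transaction_category = operation.get("description")
--         all_categories.append(transaction_category)
--
--     category_count = Counter(all_categories)
--
--     # filtered_category_count = {category: category_count[category] for category in categories}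
--     filtered_category_count = {}
--     for category in categories:
--         if category in category_count:
--             filtered_category_count[category] = category_count[category]
--
--     return filtered_category_count
-- ===== SOURCE B (Python) =====
-- def count_operations_by_category(operations: list[dict[str, str]], categories: list) -> dict:
--     """Count operations per category by scanning the operations list once per category;
--     no intermediate Counter is built."""
--     result = {}
--     for category in categories:
--         n = sum(1 for op in operations if op.get("description") == category)
--         if n > 0:
--             result[category] = n
--     return result
-- ===== Notes on version B (the rewrite author's own statement) =====
-- stated objective: simpler
-- what changed: B drops the Counter index and the intermediate descriptions list entirely: it loops over the categories and counts matching operations with a direct scan per category, inserting only positive counts.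
import Mathlib
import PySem

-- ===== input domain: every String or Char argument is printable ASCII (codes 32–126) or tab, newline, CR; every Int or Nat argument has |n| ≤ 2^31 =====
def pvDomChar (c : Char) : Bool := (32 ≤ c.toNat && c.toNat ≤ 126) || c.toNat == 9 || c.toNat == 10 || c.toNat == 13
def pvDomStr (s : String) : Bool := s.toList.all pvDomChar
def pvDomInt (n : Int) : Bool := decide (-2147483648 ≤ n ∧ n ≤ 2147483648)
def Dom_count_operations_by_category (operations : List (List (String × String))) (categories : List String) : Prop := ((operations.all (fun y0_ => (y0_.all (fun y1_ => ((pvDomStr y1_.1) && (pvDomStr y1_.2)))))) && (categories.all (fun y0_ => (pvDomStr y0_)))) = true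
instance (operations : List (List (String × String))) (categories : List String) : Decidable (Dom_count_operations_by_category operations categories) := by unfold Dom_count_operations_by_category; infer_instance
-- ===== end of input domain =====

-- B replaces A's Counter index with a direct per-category scan of the operations list (simpler; no intermediate structures).


-- ===== PORT A =====
def count_operations_by_category (operations : List (List (String × String))) (categories : List String) : List (String × Int) :=
  -- all_categories: list of operation.get("description") (Optional[str] → Option String)
  let all_categories : List (Option String) :=
    operations.foldl (fun acc operation => acc ++ [(PySem.Dict.mk operation).get? "description"]) []
  let category_count : PySem.Dict (Option String) Int := PySem.Dict.counter all_categories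
  let filtered_category_count : PySem.Dict String Int :=
    categories.foldl (fun d category =>
      if category_count.contains (some category) then
        d.insert category (category_count.getD (some category) 0)
      else d) PySem.Dict.empty
  filtered_category_count.items

-- ===== PORT B =====
def count_operations_by_category_alt (operations : List (List (String × String))) (categories : List String) : List (String × Int) :=
  (categories.foldl (fun d category =>
      let n : Int := (operations.countP (fun op => (PySem.Dict.mk op).get? "description" == some category) : Nat)
      if 0 < n then d.insert category n else d) PySem.Dict.empty).items

-- ===== PRECONDITION & SPEC =====
def Spec_count_operations_by_category (operations : List (List (String × String))) (categories : List String) (out : List (String × Int)) : Prop := out = count_operations_by_category_alt operations categories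
instance (operations : List (List (String × String))) (categories : List String) (out : List (String × Int)) : Decidable (Spec_count_operations_by_category operations categories out) := by unfold Spec_count_operations_by_category; infer_instance

-- ===== CLAIM (what is proved, stated in full; the proofs are below) =====
def Claim_equal_count_operations_by_category : Prop := ∀ (operations : List (List (String × String))) (categories : List String), Dom_count_operations_by_category operations categories → Spec_count_operations_by_category operations categories (count_operations_by_category operations categories)

-- ===== LEMMAS AND PROOFS =====

-- The two fold steps agree on every accumulator and category.
theorem pv_step_eq (operations : List (List (String × String))) (category : String)
    (d : PySem.Dict String Int) :
    (let category_count := PySem.Dict.counter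
        (operations.foldl (fun acc operation => acc ++ [(PySem.Dict.mk operation).get? "description"]) []);
     if category_count.contains (some category) then
       d.insert category (category_count.getD (some category) 0)
     else d)
    =
    (let n : Int := (operations.countP (fun op => (PySem.Dict.mk op).get? "description" == some category) : Nat);
     if 0 < n then d.insert category n else d) := by
  have hmap :
      operations.foldl (fun acc operation => acc ++ [(PySem.Dict.mk operation).get? "description"]) []
        = operations.map (fun operation => (PySem.Dict.mk operation).get? "description") :=
    (PySem.List.foldl_append_singleton_eq_map _ operations []).trans (List.nil_append _)
  simp only [hmap, PySem.Dict.contains_counter, PySem.Dict.getD_counter]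
  have hcount :
      (operations.map (fun operation => (PySem.Dict.mk operation).get? "description")).count (some category)
        = operations.countP (fun op => (PySem.Dict.mk op).get? "description" == some category) := by
    simp [List.count, List.countP_map, Function.comp_def]
  by_cases hmem : (some category) ∈ operations.map (fun operation => (PySem.Dict.mk operation).get? "description")
  · have hpos : 0 < operations.countP (fun op => (PySem.Dict.mk op).get? "description" == some category) := by
      rw [← hcount]
      exact List.count_pos_iff.mpr hmem
    simp [hmem, hcount]
    intro h
    obtain ⟨op, hop, heq⟩ := List.mem_map.mp hmem
    exact absurd heq (h op hop)
  · have hzero : operations.countP (fun op => (PySem.Dict.mk op).get? "description" == some category) = 0 := by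
      rw [← hcount]
      exact List.count_eq_zero.mpr hmem
    simp [hmem, hzero]

-- ===== VERDICT (by name: the statement is the Claim_ definition above) =====
theorem count_operations_by_category_spec : Claim_equal_count_operations_by_category := by
  intro operations categories _
  unfold Spec_count_operations_by_category count_operations_by_category count_operations_by_category_alt
  show (categories.foldl _ PySem.Dict.empty).items = (categories.foldl _ PySem.Dict.empty).items
  congr 2
  funext d category
  exact pv_step_eq operations category d
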